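-- pv_equiv track=rewrite | github.com/cuttini/RagCompressor | old/test_adaptive_windows.py | get_adaptive_sliding_windows
-- ===== SOURCE A (Python) =====
-- from typing import Dict, List, Tuple
--
-- def get_adaptive_sliding_windows(
--     chunks: List[Dict],
--     min_window_size: int = 3,
--     max_window_size: int = 7
-- ) -> List[Tuple[List[Dict], int]]:
--     """Genera finestre scorrevoli ADATTIVE basate su titolo/sezione."""
--     windows = []
--     n = len(chunks)
--
--     for i in range(n):
--         center = chunks[i]
--         center_title = center.get('title', '')
--
--         start = i
--         end = i + 1
--
--         # ESPANDI VERSO SINISTRA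
--         while (start > 0 and
--                end - start < max_window_size and
--                chunks[start - 1].get('title', '') == center_title):
--             start -= 1
--
--         # ESPANDI VERSO DESTRA
--         while (end < n and
--                end - start < max_window_size and
--                chunks[end].get('title', '') == center_title):
--             end += 1
--
--         # Se troppo piccola, allarga con contesto
--         current_size = end - start
--         if current_size < min_window_size:
--             deficit = min_window_size - current_size
--             half_deficit = deficit // 2
--             extra_left = min(half_deficit, start)
--             start -= extra_left
--             extra_right = min(deficit - extra_left, n - end)
--             end += extra_right
--
--             if end - start < min_window_size:
--                 if start > 0:
--                     start = max(0, end - min_window_size)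
--                 elif end < n:
--                     end = min(n, start + min_window_size)
--
--         window = chunks[start:end]
--         center_rel_idx = i - start
--         windows.append((window, center_rel_idx))
--
--     return windows
-- ===== SOURCE B (Python) =====
-- def get_adaptive_sliding_windows(chunks, min_window_size=3, max_window_size=7):
--     """Same windows, computed from precomputed same-title run boundaries instead of per-center while loops."""
--     n = len(chunks)
--     titles = [c.get('title', '') for c in chunks]
--     # run_start[i] / run_end[i]: bounds of the maximal contiguous block of equal titles around i
--     run_start = []
--     for i in range(n):
--         run_start.append(run_start[i - 1] if i > 0 and titles[i] == titles[i - 1] else i)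
--     run_end = [0] * n
--     for i in range(n - 1, -1, -1):
--         run_end[i] = run_end[i + 1] if i + 1 < n and titles[i] == titles[i + 1] else i + 1
--     windows = []
--     for i in range(n):
--         start = max(run_start[i], i - max(max_window_size - 1, 0))
--         end = min(run_end[i], max(i + 1, start + max_window_size))
--         size = end - start
--         if size < min_window_size:
--             deficit = min_window_size - size
--             extra_left = min(deficit // 2, start)
--             start -= extra_left
--             extra_right = min(deficit - extra_left, n - end)
--             end += extra_right
--             if end - start < min_window_size:
--                 if start > 0:
--                     start = max(0, end - min_window_size)
--                 elif end < n:
--                     end = min(n, start + min_window_size)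
--         windows.append((chunks[start:end], i - start))
--     return windows
-- ===== Notes on version B (the rewrite author's own statement) =====
-- stated objective: alternative
-- what changed: Replaced the per-center left/right while-loop expansions with precomputed contiguous same-title run boundaries (one forward and one backward pass) and closed-form start/end arithmetic per index; the min-window fallback block is unchanged.
import Mathlib
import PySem

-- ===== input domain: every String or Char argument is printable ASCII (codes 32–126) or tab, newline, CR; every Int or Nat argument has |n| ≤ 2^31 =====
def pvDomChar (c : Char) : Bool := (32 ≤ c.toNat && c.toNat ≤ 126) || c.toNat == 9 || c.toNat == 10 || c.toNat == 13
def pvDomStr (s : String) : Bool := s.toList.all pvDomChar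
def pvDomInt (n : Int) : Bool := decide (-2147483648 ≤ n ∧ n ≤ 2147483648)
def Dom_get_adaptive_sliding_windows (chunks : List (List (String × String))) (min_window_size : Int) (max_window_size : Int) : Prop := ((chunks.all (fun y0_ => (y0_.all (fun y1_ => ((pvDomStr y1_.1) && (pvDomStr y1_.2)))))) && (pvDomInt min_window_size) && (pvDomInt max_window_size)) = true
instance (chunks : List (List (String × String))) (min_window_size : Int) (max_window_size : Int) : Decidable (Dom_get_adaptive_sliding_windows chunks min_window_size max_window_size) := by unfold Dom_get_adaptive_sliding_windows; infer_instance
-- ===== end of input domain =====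

-- B replaces A's per-center while-loop expansions by precomputed same-title run
-- boundaries and closed-form window arithmetic; return values proved equal on all inputs.

-- ===== PORT A =====
-- chunk.get('title', '')
def pvTitle (c : List (String × String)) : String := (PySem.Dict.mk c).getD "title" ""

-- A's "ESPANDI VERSO SINISTRA" while loop (fuel ≥ initial start suffices: start decreases to 0 at worst)
def pvLeftA (chunks : List (List (String × String))) (t : String) (maxw e : Int) : Nat → Int → Int
  | 0, s => s
  | f + 1, s =>
    if 0 < s ∧ e - s < maxw ∧ pvTitle (chunks.getD (s - 1).toNat []) = t then
      pvLeftA chunks t maxw e f (s - 1)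
    else s

-- A's "ESPANDI VERSO DESTRA" while loop (fuel ≥ n - initial end suffices)
def pvRightA (chunks : List (List (String × String))) (t : String) (maxw s n : Int) : Nat → Int → Int
  | 0, e => e
  | f + 1, e =>
    if e < n ∧ e - s < maxw ∧ pvTitle (chunks.getD e.toNat []) = t then
      pvRightA chunks t maxw s n f (e + 1)
    else e

-- the "Se troppo piccola, allarga con contesto" block, identical in both Pythons
def pvFixup (minw n start e : Int) : Int × Int :=
  let cs := e - start
  if cs < minw then
    let deficit := minw - cs
    let half := PySem.Int.floordiv deficit 2
    let extraL := min half start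
    let start' := start - extraL
    let extraR := min (deficit - extraL) (n - e)
    let e' := e + extraR
    if e' - start' < minw then
      if 0 < start' then (max 0 (e' - minw), e')
      else if e' < n then (start', min n (start' + minw))
      else (start', e')
    else (start', e')
  else (start, e)

def get_adaptive_sliding_windows (chunks : List (List (String × String))) (min_window_size : Int) (max_window_size : Int) : List ((List (List (String × String))) × Int) :=
  let n : Int := chunks.length
  (List.range chunks.length).map (fun i =>
    let t := pvTitle (chunks.getD i [])
    let start := pvLeftA chunks t max_window_size ((i : Int) + 1) i (i : Int)
    let e := pvRightA chunks t max_window_size start n chunks.length ((i : Int) + 1)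
    let p := pvFixup min_window_size n start e
    (PySem.List.slice chunks (some p.1) (some p.2), (i : Int) - p.1))

-- ===== PORT B =====
-- forward pass: run_start[i] from run_start[i-1]
def pvRunStart (titles : List String) : Nat → Nat
  | 0 => 0
  | i + 1 => if titles.getD (i + 1) "" = titles.getD i "" then pvRunStart titles i else i + 1

-- backward pass: run_end[i] from run_end[i+1]
def pvRunEnd (titles : List String) (n : Nat) (i : Nat) : Nat :=
  if h : i + 1 < n ∧ titles.getD (i + 1) "" = titles.getD i "" then pvRunEnd titles n (i + 1) else i + 1
termination_by n - i
decreasing_by omega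

def get_adaptive_sliding_windows_alt (chunks : List (List (String × String))) (min_window_size : Int) (max_window_size : Int) : List ((List (List (String × String))) × Int) :=
  let n := chunks.length
  let titles := chunks.map pvTitle
  (List.range n).map (fun i =>
    let start : Int := max (pvRunStart titles i : Int) ((i : Int) - max (max_window_size - 1) 0)
    let e : Int := min (pvRunEnd titles n i : Int) (max ((i : Int) + 1) (start + max_window_size))
    let p := pvFixup min_window_size (n : Int) start e
    (PySem.List.slice chunks (some p.1) (some p.2), (i : Int) - p.1))

-- ===== PRECONDITION & SPEC =====
def Spec_get_adaptive_sliding_windows (chunks : List (List (String × String))) (min_window_size : Int) (max_window_size : Int) (out : List ((List (List (String × String))) × Int)) : Prop := out = get_adaptive_sliding_windows_alt chunks min_window_size max_window_size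
instance (chunks : List (List (String × String))) (min_window_size : Int) (max_window_size : Int) (out : List ((List (List (String × String))) × Int)) : Decidable (Spec_get_adaptive_sliding_windows chunks min_window_size max_window_size out) := by unfold Spec_get_adaptive_sliding_windows; infer_instance

-- ===== CLAIM (what is proved, stated in full; the proofs are below) =====
def Claim_equal_get_adaptive_sliding_windows : Prop := ∀ (chunks : List (List (String × String))) (min_window_size : Int) (max_window_size : Int), Dom_get_adaptive_sliding_windows chunks min_window_size max_window_size → Spec_get_adaptive_sliding_windows chunks min_window_size max_window_size (get_adaptive_sliding_windows chunks min_window_size max_window_size)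

-- ===== LEMMAS AND PROOFS =====

-- titles list lookup agrees with looking up the chunk then its title (pvTitle [] = "")
lemma pvTitle_getD (chunks : List (List (String × String))) (j : Nat) :
    (chunks.map pvTitle).getD j "" = pvTitle (chunks.getD j []) := by
  simp [List.getD_eq_getElem?_getD, List.getElem?_map]
  cases chunks[j]? <;> simp [pvTitle, PySem.Dict.getD, PySem.Dict.get?]

lemma pvRunStart_le (titles : List String) (i : Nat) : pvRunStart titles i ≤ i := by
  induction i with
  | zero => simp [pvRunStart]
  | succ i ih => simp only [pvRunStart]; split <;> omega

lemma pvRunStart_run (titles : List String) (i : Nat) :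
    ∀ j, pvRunStart titles i ≤ j → j ≤ i → titles.getD j "" = titles.getD i "" := by
  induction i with
  | zero =>
    intro j h1 h2
    have : j = 0 := by omega
    subst this; rfl
  | succ i ih =>
    intro j h1 h2
    by_cases heq : titles.getD (i + 1) "" = titles.getD i ""
    · simp only [pvRunStart, if_pos heq] at h1
      rcases Nat.lt_or_ge j (i + 1) with h | h
      · rw [ih j h1 (by omega)]; exact heq.symm
      · have : j = i + 1 := by omega
        subst this; rfl
    · simp only [pvRunStart, if_neg heq] at h1
      have : j = i + 1 := by omega
      subst this; rfl

lemma pvRunStart_stop (titles : List String) (i : Nat) (h : 0 < pvRunStart titles i) :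
    titles.getD (pvRunStart titles i - 1) "" ≠ titles.getD i "" := by
  induction i with
  | zero => simp [pvRunStart] at h
  | succ i ih =>
    by_cases heq : titles.getD (i + 1) "" = titles.getD i ""
    · simp only [pvRunStart, if_pos heq] at h ⊢
      rw [heq]; exact ih h
    · simp only [pvRunStart, if_neg heq] at h ⊢
      exact fun hc => heq hc.symm

lemma pvRunEnd_bounds (titles : List String) (n i : Nat) (hi : i < n) :
    i < pvRunEnd titles n i ∧ pvRunEnd titles n i ≤ n := by
  fun_induction pvRunEnd titles n i with
  | case1 i h ih => have := ih h.1; omega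
  | case2 i h => omega

lemma pvRunEnd_run (titles : List String) (n i : Nat) :
    ∀ j, i ≤ j → j < pvRunEnd titles n i → titles.getD j "" = titles.getD i "" := by
  fun_induction pvRunEnd titles n i with
  | case1 i h ih =>
    intro j h1 h2
    rcases Nat.lt_or_ge i j with hlt | hge
    · rw [ih j (by omega) h2]; exact h.2
    · have : j = i := by omega
      subst this; rfl
  | case2 i h =>
    intro j h1 h2
    have : j = i := by omega
    subst this; rfl

lemma pvRunEnd_stop (titles : List String) (n i : Nat) (hi : i < n) :
    pvRunEnd titles n i = n ∨ titles.getD (pvRunEnd titles n i) "" ≠ titles.getD i "" := by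
  fun_induction pvRunEnd titles n i with
  | case1 i h ih =>
    rcases ih (h.1) with h' | h'
    · exact Or.inl h'
    · exact Or.inr (fun hc => h' (by rw [hc, h.2]))
  | case2 i h =>
    rcases Nat.lt_or_ge (i + 1) n with hlt | hge
    · have hne : ¬ titles.getD (i + 1) "" = titles.getD i "" := fun hc => h ⟨hlt, hc⟩
      exact Or.inr hne
    · exact Or.inl (by omega)

-- A's left while loop computes the closed form
lemma pvLeftA_eq (chunks : List (List (String × String))) (maxw : Int) (i : Nat)
    (_hi : i < chunks.length) :
    ∀ f (s : Nat), pvRunStart (chunks.map pvTitle) i ≤ s → s ≤ i → s ≤ f →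
      pvLeftA chunks (pvTitle (chunks.getD i [])) maxw ((i : Int) + 1) f (s : Int) =
        max (pvRunStart (chunks.map pvTitle) i : Int) (min (s : Int) ((i : Int) + 1 - maxw)) := by
  set titles := chunks.map pvTitle with htitles
  have ht : pvTitle (chunks.getD i []) = titles.getD i "" := (pvTitle_getD chunks i).symm
  intro f
  induction f with
  | zero =>
    intro s h1 h2 h3
    have hs0 : s = 0 := by omega
    subst hs0
    have hrs : pvRunStart titles i = 0 := by omega
    simp only [pvLeftA]
    omega
  | succ f ih =>
    intro s h1 h2 h3
    simp only [pvLeftA]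
    by_cases hgt : pvRunStart titles i < s
    · -- title at s-1 equals center title
      have hteq : titles.getD (s - 1) "" = titles.getD i "" :=
        pvRunStart_run titles i (s - 1) (by omega) (by omega)
      have htn : ((s : Int) - 1).toNat = s - 1 := by omega
      by_cases hbud : ((i : Int) + 1) - (s : Int) < maxw
      · rw [if_pos ⟨by omega, hbud, by rw [htn, ht, ← pvTitle_getD chunks (s-1)]; exact hteq⟩]
        have hcast : ((s : Int) - 1) = ((s - 1 : Nat) : Int) := by omega
        rw [hcast, ih (s - 1) (by omega) (by omega) (by omega)]
        omega
      · rw [if_neg (by intro hc; exact hbud hc.2.1)]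
        omega
    · -- s = run start: loop stops
      have hse : s = pvRunStart titles i := by omega
      have hstop : ¬ (0 < (s : Int) ∧ ((i : Int) + 1) - (s : Int) < maxw ∧
          pvTitle (chunks.getD ((s : Int) - 1).toNat []) = pvTitle (chunks.getD i [])) := by
        rintro ⟨hpos, _, hteq⟩
        have hs0 : 0 < s := by omega
        have htn : ((s : Int) - 1).toNat = s - 1 := by omega
        rw [htn, ht, ← pvTitle_getD chunks (s-1)] at hteq
        exact pvRunStart_stop titles i (by omega) (by rw [← hse]; exact hteq)
      rw [if_neg hstop]
      omega

-- A's right while loop computes the closed form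
lemma pvRightA_eq (chunks : List (List (String × String))) (maxw s : Int) (i : Nat)
    (hi : i < chunks.length) :
    ∀ f (e : Nat), i + 1 ≤ e → e ≤ pvRunEnd (chunks.map pvTitle) chunks.length i →
      pvRunEnd (chunks.map pvTitle) chunks.length i - e ≤ f →
      pvRightA chunks (pvTitle (chunks.getD i [])) maxw s (chunks.length : Int) f (e : Int) =
        min (pvRunEnd (chunks.map pvTitle) chunks.length i : Int) (max (e : Int) (s + maxw)) := by
  set titles := chunks.map pvTitle with htitles
  set re := pvRunEnd titles chunks.length i with hre
  have hreb := pvRunEnd_bounds titles chunks.length i hi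
  have ht : pvTitle (chunks.getD i []) = titles.getD i "" := (pvTitle_getD chunks i).symm
  intro f
  induction f with
  | zero =>
    intro e h1 h2 h3
    have he : e = re := by omega
    simp only [pvRightA]
    omega
  | succ f ih =>
    intro e h1 h2 h3
    simp only [pvRightA]
    by_cases hlt : e < re
    · have hteq : titles.getD e "" = titles.getD i "" :=
        pvRunEnd_run titles chunks.length i e (by omega) (by omega)
      by_cases hbud : (e : Int) - s < maxw
      · rw [if_pos ⟨by exact_mod_cast (by omega : (e:Int) < chunks.length), hbud,
          by rw [(by omega : ((e : Int)).toNat = e), ht, ← pvTitle_getD chunks e]; exact hteq⟩]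
        have hcast : ((e : Int) + 1) = ((e + 1 : Nat) : Int) := by omega
        rw [hcast, ih (e + 1) (by omega) (by omega) (by omega)]
        omega
      · rw [if_neg (by intro hc; exact hbud hc.2.1)]
        omega
    · -- e = re: loop stops
      have he : e = re := by omega
      have hstop : ¬ ((e : Int) < (chunks.length : Int) ∧ (e : Int) - s < maxw ∧
          pvTitle (chunks.getD ((e : Int)).toNat []) = pvTitle (chunks.getD i [])) := by
        rintro ⟨hen, _, hteq⟩
        rw [(by omega : ((e : Int)).toNat = e), ht, ← pvTitle_getD chunks e] at hteq
        rcases pvRunEnd_stop titles chunks.length i hi with h' | h'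
        · omega
        · exact h' (by rw [← hre, ← he]; exact hteq)
      rw [if_neg hstop]
      omega

-- ===== VERDICT (by name: the statement is the Claim_ definition above) =====
theorem get_adaptive_sliding_windows_spec : Claim_equal_get_adaptive_sliding_windows := by
  intro chunks minw maxw _
  unfold Spec_get_adaptive_sliding_windows
  unfold get_adaptive_sliding_windows get_adaptive_sliding_windows_alt
  apply List.map_congr_left
  intro i hi
  have hi' : i < chunks.length := List.mem_range.mp hi
  have hrsle := pvRunStart_le (chunks.map pvTitle) i
  have hreb := pvRunEnd_bounds (chunks.map pvTitle) chunks.length i hi'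
  have hL := pvLeftA_eq chunks maxw i hi' i i hrsle le_rfl le_rfl
  -- B's start formula equals the left loop's closed form
  have hstart' : pvLeftA chunks (pvTitle (chunks.getD i [])) maxw ((i : Int) + 1) i (i : Int) =
      max (pvRunStart (chunks.map pvTitle) i : Int) ((i : Int) - max (maxw - 1) 0) := by
    rw [hL]; omega
  have hR := pvRightA_eq chunks maxw
      (max (pvRunStart (chunks.map pvTitle) i : Int) ((i : Int) - max (maxw - 1) 0)) i hi'
      chunks.length (i + 1) le_rfl (by omega) (by omega)
  have hcast : ((i : Int) + 1) = ((i + 1 : Nat) : Int) := by omega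
  simp only [hcast] at hstart' hR ⊢
  rw [hstart', hR]
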